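-- pv_equiv track=rewrite | github.com/pypi-data/pypi-mirror-356 | packages/mcp-f1analisys/mcp_f1analisys-0.1.1.dev2.tar.gz/mcp_f1analisys-0.1.1.dev2/mcp_f1analisys/utils/path_utils.py | get_drivers_laps_path
-- ===== SOURCE A (Python) =====
-- def get_drivers_laps_path(drivers_laps_range: dict) -> str:
--     """Build path for drivers and laps comparison"""
--     drivers_path = "compare"
--     keys_list = list(drivers_laps_range.keys())
--     for driver in keys_list:
--         lap_range = drivers_laps_range[driver]
--         drivers_path += f"/{driver}"
--         for lap in lap_range:
--             drivers_path += f"/{lap}"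
--         if keys_list.index(driver) < len(keys_list) - 1:
--             drivers_path += "/vs"
--     return drivers_path
-- ===== SOURCE B (Python) =====
-- def get_drivers_laps_path(drivers_laps_range: dict) -> str:
--     """Build path for drivers and laps comparison (collect pieces, then join)."""
--     pieces = ("/" + driver + "".join(f"/{lap}" for lap in laps)
--               for driver, laps in drivers_laps_range.items())
--     return "compare" + "/vs".join(pieces)
-- ===== Notes on version B (the rewrite author's own statement) =====
-- stated objective: simpler
-- what changed: A builds the string by in-place concatenation and decides the '/vs' separator with a positional keys_list.index scan on every iteration; B builds one sub-path piece per (driver, laps) entry and returns 'compare' + '/vs'.join(pieces), eliminating the separator branch and the quadratic index scan.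
import Mathlib
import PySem

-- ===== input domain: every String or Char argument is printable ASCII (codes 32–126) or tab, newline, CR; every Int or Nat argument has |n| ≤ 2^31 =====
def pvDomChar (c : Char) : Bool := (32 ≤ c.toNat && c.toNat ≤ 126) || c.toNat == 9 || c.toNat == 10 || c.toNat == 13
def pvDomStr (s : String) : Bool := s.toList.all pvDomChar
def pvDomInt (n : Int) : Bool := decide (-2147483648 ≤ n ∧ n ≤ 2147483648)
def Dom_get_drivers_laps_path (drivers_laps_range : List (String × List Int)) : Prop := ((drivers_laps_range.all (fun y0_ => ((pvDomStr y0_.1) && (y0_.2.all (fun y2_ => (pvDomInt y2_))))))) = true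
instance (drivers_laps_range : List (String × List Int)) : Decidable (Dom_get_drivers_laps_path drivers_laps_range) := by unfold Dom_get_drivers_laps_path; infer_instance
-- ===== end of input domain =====

-- B replaces A's in-place concatenation with positional `.index` separator check by a
-- collect-pieces-then-'/vs'.join decomposition (objective: simpler). Return value only; no mutation.

-- ===== PORT A =====
-- `keys_list.index(driver) < len(keys_list) - 1` (index always succeeds: driver ∈ keys_list)
def pvIdxLt (keys_list : List String) (driver : String) : Bool :=
  match PySem.List.index? keys_list driver with
  | some i => decide ((i : Int) < (keys_list.length : Int) - 1)
  | none => false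

def get_drivers_laps_path (drivers_laps_range : List (String × List Int)) : String :=
  let d := PySem.Dict.ofList drivers_laps_range
  let keys_list := d.keys
  let chars := keys_list.foldl (fun drivers_path driver =>
    let lap_range := d.getD driver []
    let drivers_path := drivers_path ++ ('/' :: driver.toList)
    let drivers_path := lap_range.foldl
      (fun p lap => p ++ ('/' :: (PySem.Int.toStr lap).toList)) drivers_path
    if pvIdxLt keys_list driver then drivers_path ++ "/vs".toList else drivers_path)
    "compare".toList
  String.mk chars

-- ===== PORT B =====
def get_drivers_laps_path_alt (drivers_laps_range : List (String × List Int)) : String :=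
  let d := PySem.Dict.ofList drivers_laps_range
  let pieces := d.items.map (fun p =>
    '/' :: p.1.toList ++ p.2.flatMap (fun lap => '/' :: (PySem.Int.toStr lap).toList))
  String.mk ("compare".toList ++ PySem.Chars.join "/vs".toList pieces)

-- ===== PRECONDITION & SPEC =====
def Spec_get_drivers_laps_path (drivers_laps_range : List (String × List Int)) (out : String) : Prop := out = get_drivers_laps_path_alt drivers_laps_range
instance (drivers_laps_range : List (String × List Int)) (out : String) : Decidable (Spec_get_drivers_laps_path drivers_laps_range out) := by unfold Spec_get_drivers_laps_path; infer_instance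

-- ===== CLAIM (what is proved, stated in full; the proofs are below) =====
def Claim_equal_get_drivers_laps_path : Prop := ∀ (drivers_laps_range : List (String × List Int)), Dom_get_drivers_laps_path drivers_laps_range → Spec_get_drivers_laps_path drivers_laps_range (get_drivers_laps_path drivers_laps_range)

-- ===== LEMMAS AND PROOFS =====

-- the index-based separator test says exactly "driver is not in last position";
-- over a Nodup key list, A's separator-after-each-but-last fold is a join.
theorem pvIdxLt_cons_self (k : String) (t : List String) :
    pvIdxLt (k :: t) k = !t.isEmpty := by
  unfold pvIdxLt
  rw [PySem.List.index?_cons_self]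
  cases t <;> simp

theorem pvIdxLt_cons_of_mem (k x : String) (t : List String) (hx : x ∈ t) (hne : k ≠ x) :
    pvIdxLt (k :: t) x = pvIdxLt t x := by
  unfold pvIdxLt
  rw [PySem.List.index?_cons_of_ne t hne]
  obtain ⟨i, hi⟩ := Option.isSome_iff_exists.mp ((PySem.List.index?_isSome_iff t x).mpr hx)
  rw [hi]
  simp only [Option.map_some, List.length_cons, decide_eq_decide]
  push_cast
  omega

theorem pv_fold_join (piece : String → List Char) :
    ∀ (keys : List String), keys.Nodup → ∀ (acc : List Char),
      keys.foldl (fun p k => if pvIdxLt keys k then (p ++ piece k) ++ "/vs".toList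
                             else p ++ piece k) acc
      = acc ++ PySem.Chars.join "/vs".toList (keys.map piece) := by
  intro keys
  induction keys with
  | nil => intro _ acc; simp [PySem.Chars.join_nil]
  | cons k t ih =>
    intro hnd acc
    have hk : k ∉ t := (List.nodup_cons.mp hnd).1
    have hnt : t.Nodup := (List.nodup_cons.mp hnd).2
    simp only [List.foldl_cons]
    rw [PySem.List.foldl_congr_mem' t _
      (fun p x => if pvIdxLt t x then (p ++ piece x) ++ "/vs".toList else p ++ piece x) _
      (by
        intro x hx acc'
        rw [pvIdxLt_cons_of_mem k x t hx (fun h => hk (h ▸ hx))])]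
    rw [ih hnt]
    rw [pvIdxLt_cons_self]
    cases t with
    | nil => simp [PySem.Chars.join_singleton]
    | cons q r =>
      simp only [List.isEmpty_cons, Bool.not_false, if_pos, List.map_cons,
        PySem.Chars.join_cons_cons]
      simp

-- ===== VERDICT (by name: the statement is the Claim_ definition above) =====
theorem get_drivers_laps_path_spec : Claim_equal_get_drivers_laps_path := by
  intro l _
  unfold Spec_get_drivers_laps_path get_drivers_laps_path get_drivers_laps_path_alt
  simp only []
  set d := PySem.Dict.ofList l with hd
  have hnd : d.keys.Nodup := PySem.Dict.nodup_keys_ofList l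
  rw [PySem.Dict.items_eq_map_keys d hnd []]
  rw [List.map_map]
  congr 1
  rw [PySem.List.foldl_congr_mem' d.keys _
    (fun p k => if pvIdxLt d.keys k
      then (p ++ ('/' :: (k.toList ++ (d.getD k []).flatMap (fun lap => '/' :: (PySem.Int.toStr lap).toList)))) ++ "/vs".toList
      else p ++ ('/' :: (k.toList ++ (d.getD k []).flatMap (fun lap => '/' :: (PySem.Int.toStr lap).toList)))) _
    (by
      intro x _ acc'
      simp only [PySem.List.foldl_append_eq_flatMap, List.append_assoc, List.cons_append])]
  rw [pv_fold_join (fun k => '/' :: (k.toList ++ (d.getD k []).flatMap (fun lap => '/' :: (PySem.Int.toStr lap).toList))) d.keys hnd]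
  rfl
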